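-- pv_equiv track=rewrite | github.com/SyrovatkaA/Codecademy-Censor_Dispenser | censor_dispenser_solution.py | censor_four
-- ===== SOURCE A (Python) =====
-- negative_words = ["concerned", "behind", "danger", "dangerous", "alarming", "alarmed", "out of control", "help", "unhappy", "bad", "upset", "awful", "broken", "damage", "damaging", "dismal", "distressed", "distressing", "concerning", "horrible", "horribly", "questionable"]
--
-- def censor_four(email, censored_list, negative_words):
--   censored_list += negative_words
--   email_words = []
--   for x in email.split(" "):
--     x1 = x.split("\n")
--     for word in x1:
--       email_words.append(word)
--   for i in range(len(email_words)):
--     for j in range(len(censored_list)):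
--       if censored_list[j] in email_words[i].lower():
--         # word before
--         censorer_before = ''
--         for letter in email_words[i-1]:
--           if letter == ' ':
--             censorer_before += ' '
--           else:
--             censorer_before += '█'
--         email_words[i-1] = email_words[i-1].replace(email_words[i-1], censorer_before)
--         # word
--         censorer = ''
--         for letter in email_words[i]:
--           if letter == ' ':
--             censorer += ' '
--           else:
--             censorer += '█'
--         email_words[i] = email_words[i].replace(email_words[i], censorer)
--         # word after
--         censorer_after = ''
--         for letter in email_words[i+1]:
--           if letter == ' ':
--             censorer_after += ' '
--           else:
--             censorer_after += '█'
--         email_words[i+1] = email_words[i+1].replace(email_words[i+1], censorer_after)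
--   return ' '.join(email_words)
-- ===== SOURCE B (Python) =====
-- def censor_four(email, censored_list, negative_words):
--     patterns = censored_list + negative_words
--     words = [w for part in email.split(" ") for w in part.split("\n")]
--     n = len(words)
--     masked = [False] * n
--     for i in range(n):
--         if not masked[i] and any(p in words[i].lower() for p in patterns):
--             for j in (i - 1, i, i + 1):
--                 masked[j] = True
--     return ' '.join('█' * len(w) if m else w for w, m in zip(words, masked))
-- ===== Notes on version B (the rewrite author's own statement) =====
-- stated objective: simpler
-- what changed: B replaces A's in-place nested rescan (mutating the word list while scanning it, rebuilding each censored word character by character and re-matching every pattern against the mutated strings) by a boolean mask and a single forward pass that skips already-masked words and marks the neighbourhood i-1, i, i+1 of each matching word, rendering the output once at the end; Pre_ excludes exactly the inputs on which A raises IndexError (an empty listed word, or a last word that still matches at its turn); B never mutates the words or censored_list (A does censored_list += negative_words).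
import Mathlib
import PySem

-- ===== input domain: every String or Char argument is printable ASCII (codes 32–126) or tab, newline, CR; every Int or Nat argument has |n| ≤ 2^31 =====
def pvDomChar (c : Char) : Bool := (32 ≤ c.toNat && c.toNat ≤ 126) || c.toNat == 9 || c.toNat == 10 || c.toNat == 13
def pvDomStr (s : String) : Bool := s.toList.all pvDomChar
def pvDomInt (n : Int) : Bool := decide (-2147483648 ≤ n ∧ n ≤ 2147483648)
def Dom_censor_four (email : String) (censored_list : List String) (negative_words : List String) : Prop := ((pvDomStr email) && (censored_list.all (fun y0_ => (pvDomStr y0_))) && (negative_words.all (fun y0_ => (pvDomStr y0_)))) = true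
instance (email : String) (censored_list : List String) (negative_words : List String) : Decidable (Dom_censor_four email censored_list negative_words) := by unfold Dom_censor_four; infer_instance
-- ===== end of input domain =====

-- B replaces A's in-place nested rescan by a boolean mask and a single forward skip-scan;
-- equivalence is about the RETURN value only (A mutates censored_list via +=, B does not).

-- ===== PORT A =====
-- helper shared by both ports and the spec: Python s.split(sep) for a nonempty sep (exact)
def pvSplitStr (s sep : String) : List String :=
  (PySem.Chars.splitOn s.toList sep.toList).map String.ofList

-- the three identical "censorer" letter loops of A
def pvCensorer (w : String) : String :=
  String.ofList (w.toList.foldl (fun acc c => if c = ' ' then acc ++ [' '] else acc ++ ['█']) [])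

-- email_words[k] = email_words[k].replace(email_words[k], censorer(email_words[k])); none = IndexError
def pvCensorAt (ws : List String) (k : Int) : Option (List String) :=
  match PySem.List.pyGet? ws k with
  | none => none
  | some w => PySem.List.pySet? ws k (PySem.Str.replace w w (pvCensorer w))

-- the inner "for j in range(len(censored_list))" loop of A at outer index i
def pvStepA (cl : List String) (i : Int) (ws : List String) : Option (List String) :=
  cl.foldl (fun acc p => acc.bind (fun ws1 =>
    match PySem.List.pyGet? ws1 i with
    | none => none
    | some w =>
      if PySem.Str.isIn p (PySem.Str.lower w) then
        (pvCensorAt ws1 (i - 1)).bind (fun ws2 => (pvCensorAt ws2 i).bind (fun ws3 => pvCensorAt ws3 (i + 1)))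
      else some ws1)) (some ws)

def censor_four (email : String) (censored_list : List String) (negative_words : List String) : String :=
  let cl2 := censored_list ++ negative_words
  let ews := (pvSplitStr email " ").foldl
    (fun acc x => (pvSplitStr x "\n").foldl (fun acc2 w => acc2 ++ [w]) acc) []
  match (PySem.List.pyRange 0 (ews.length : Int) 1).foldl
      (fun acc i => acc.bind (pvStepA cl2 i)) (some ews) with
  | some ws => PySem.Str.join " " ws
  | none => ""   -- Python raises IndexError here; excluded by Pre_censor_four

-- ===== PORT B =====
-- B's loop body at word i: if word i is not already masked and matches, mark the mask at
-- i-1 (Python wraps a negative index), i and i+1 (none = IndexError past the end)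
def pvStepB (pats words : List String) (i : Int) (m : List Bool) : Option (List Bool) :=
  if !(PySem.List.pyGetD m i false)
      && pats.any (fun p => PySem.Str.isIn p (PySem.Str.lower (PySem.List.pyGetD words i ""))) then
    ([i - 1, i, i + 1] : List Int).foldl
      (fun acc j => acc.bind (fun m2 => PySem.List.pySet? m2 j true)) (some m)
  else some m

def censor_four_alt (email : String) (censored_list : List String) (negative_words : List String) : String :=
  let patterns := censored_list ++ negative_words
  let words := (pvSplitStr email " ").flatMap (fun part => pvSplitStr part "\n")
  let n := words.length
  match (PySem.List.pyRange 0 (n : Int) 1).foldl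
      (fun acc i => acc.bind (pvStepB patterns words i)) (some (List.replicate n false)) with
  | some m => PySem.Str.join " " ((words.zip m).map
      (fun wm => if wm.2 then String.ofList (List.replicate wm.1.toList.length '█') else wm.1))
  | none => ""   -- Python raises IndexError here; excluded by Pre_censor_four

-- ===== PRECONDITION & SPEC =====
-- the same word list, stated independently of the ports: split the characters at every ' ' or '\n'
def pvEmailWords (email : String) : List String :=
  (email.toList.splitOnP (fun c => c = ' ' || c = '\n')).map String.ofList

-- does word w contain one of the listed words (Python: p in w.lower())? stated as substring membership
def pvHitP (pats : List String) (w : String) : Prop :=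
  ∃ p ∈ pats, p.toList <:+: PySem.Chars.lower w.toList

-- closed form of "word i triggers the censoring": inside each maximal run of consecutive
-- matching words every other word triggers, starting with the first word of the run
def pvTrigP (pats ws : List String) (i : ℕ) : Prop :=
  ∃ s < i + 1, (i - s) % 2 = 0 ∧ (∀ j < i + 1, s ≤ j → pvHitP pats (ws.getD j ""))
    ∧ (s = 0 ∨ ¬ pvHitP pats (ws.getD (s - 1) ""))

-- Pre_ excludes exactly the inputs on which A raises IndexError (email_words[i+1] past the end):
-- the last word still matches a listed word when its turn comes — always so when "" is listed.
def Pre_censor_four (email : String) (censored_list : List String) (negative_words : List String) : Prop :=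
  let pats := censored_list ++ negative_words
  let ws := pvEmailWords email
  let n := ws.length
  ¬ ("" ∈ pats ∨ (n = 1 ∧ pvHitP pats (ws.getD 0 ""))
      ∨ (2 ≤ n ∧ pvHitP pats (ws.getD (n - 1) "") ∧ ¬ pvHitP pats (ws.getD 0 "") ∧ ¬ pvTrigP pats ws (n - 2)))

instance (email : String) (censored_list : List String) (negative_words : List String) :
    Decidable (Pre_censor_four email censored_list negative_words) := by
  unfold Pre_censor_four pvTrigP pvHitP; infer_instance

def pvWitness_censor_four : String × List String × List String := ("this is fine today", [], ["bad"])

def Spec_censor_four (email : String) (censored_list : List String) (negative_words : List String) (out : String) : Prop := out = censor_four_alt email censored_list negative_words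
instance (email : String) (censored_list : List String) (negative_words : List String) (out : String) : Decidable (Spec_censor_four email censored_list negative_words out) := by unfold Spec_censor_four; infer_instance

-- ===== CLAIM (what is proved, stated in full; the proofs are below) =====
def Claim_equal_censor_four : Prop := ∀ (email : String) (censored_list : List String) (negative_words : List String), Dom_censor_four email censored_list negative_words → Pre_censor_four email censored_list negative_words → Spec_censor_four email censored_list negative_words (censor_four email censored_list negative_words)

-- ===== LEMMAS AND PROOFS =====

-- the word list A builds: email split on " ", every piece split again on "\n"
def pvWords (email : String) : List String :=
  (pvSplitStr email " ").flatMap (fun part => pvSplitStr part "\n")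


theorem pv_go_nil (old new : List Char) (fuel : ℕ) (acc : List Char) :
    PySem.Chars.replace.go old new fuel [] acc = acc.reverse := by
  cases fuel <;> rw [PySem.Chars.replace.go.eq_def] <;> simp

theorem pv_replace_self (w v : List Char) : PySem.Chars.replace w w v = v := by
  cases w with
  | nil => simp [PySem.Chars.replace]
  | cons c t =>
    show PySem.Chars.replace (c::t) (c::t) v = v
    rw [PySem.Chars.replace]
    simp only [List.isEmpty_cons, Bool.false_eq_true, if_false, List.length_cons]
    rw [PySem.Chars.replace.go.eq_def]
    simp [List.isPrefixOf_iff_prefix, List.drop_length, pv_go_nil]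

theorem pv_replace_self_str (w v : String) : PySem.Str.replace w w v = v := by
  simp [PySem.Str.replace, pv_replace_self]

theorem pv_splitOn_go_mem (P : Char → Prop) (c0 : Char) :
    ∀ (fuel : ℕ) (l cur : List Char) (acc : List (List Char)),
    l.length ≤ fuel → (∀ ch ∈ l, P ch) → (∀ ch ∈ cur, P ch ∧ ch ≠ c0) →
    ∀ p ∈ PySem.Chars.splitOn.go [c0] fuel l cur acc,
      p ∈ acc ∨ ∀ ch ∈ p, P ch ∧ ch ≠ c0 := by
  intro fuel
  induction fuel with
  | zero =>
    intro l cur acc hlen hl hcur p hp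
    have hl0 : l = [] := List.length_eq_zero_iff.mp (Nat.le_zero.mp hlen)
    subst hl0
    rw [PySem.Chars.splitOn.go.eq_def] at hp
    simp at hp
    rcases hp with h | h
    · left; exact h
    · right; subst h; intro ch hch; exact hcur ch (by simpa using hch)
  | succ f ih =>
    intro l cur acc hlen hl hcur p hp
    match l with
    | [] =>
      rw [PySem.Chars.splitOn.go.eq_def] at hp
      simp at hp
      rcases hp with h | h
      · left; exact h
      · right; subst h; intro ch hch; exact hcur ch (by simpa using hch)
    | c :: rest =>
      rw [PySem.Chars.splitOn.go.eq_def] at hp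
      simp only [] at hp
      by_cases hpre : List.isPrefixOf [c0] (c :: rest) = true
      · rw [if_pos hpre] at hp
        have hc : c = c0 := by
          have := (List.isPrefixOf_iff_prefix.mp hpre)
          rcases List.cons_prefix_cons.mp this with ⟨h1, _⟩
          exact h1.symm
        have := ih (List.drop 1 (c :: rest)) [] (cur.reverse :: acc)
          (by simp at hlen ⊢; omega)
          (fun ch hch => hl ch (List.mem_of_mem_drop hch))
          (by simp) p (by simpa using hp)
        rcases this with h | h
        · rcases List.mem_cons.mp h with h1 | h2
          · right; subst h1; intro ch hch
            exact hcur ch (by simpa using hch)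
          · left; exact h2
        · right; exact h
      · rw [if_neg hpre] at hp
        have hc : c ≠ c0 := fun h => hpre (by
          apply List.isPrefixOf_iff_prefix.mpr
          exact List.cons_prefix_cons.mpr ⟨h.symm, List.nil_prefix⟩)
        exact ih rest (c :: cur) acc (by simp at hlen ⊢; omega)
          (fun ch hch => hl ch (List.mem_cons_of_mem _ hch))
          (by intro ch hch
              rcases List.mem_cons.mp hch with h1 | h2
              · subst h1; exact ⟨hl ch List.mem_cons_self, hc⟩
              · exact hcur ch h2) p hp

theorem pv_splitOn_mem (s : List Char) (c0 : Char) :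
    ∀ p ∈ PySem.Chars.splitOn s [c0], ∀ ch ∈ p, ch ∈ s ∧ ch ≠ c0 := by
  intro p hp
  have := pv_splitOn_go_mem (· ∈ s) c0 (s.length + 1) s [] []
    (by omega) (fun ch h => h) (by simp) p hp
  simpa using this

def pvBlocks (w : String) : String := String.ofList (List.replicate w.toList.length '█')

theorem pv_censorer_eq_blocks (w : String) (h : ' ' ∉ w.toList) : pvCensorer w = pvBlocks w := by
  unfold pvCensorer pvBlocks
  congr 1
  calc w.toList.foldl (fun acc c => if c = ' ' then acc ++ [' '] else acc ++ ['█']) []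
      = w.toList.foldl (fun acc c => acc ++ [(fun _ => '█') c]) [] := by
        apply PySem.List.foldl_congr_mem
        intro acc c hc
        by_cases hce : c = ' '
        · exact absurd (hce ▸ hc) h
        · simp [hce]
    _ = [] ++ w.toList.map (fun _ => '█') := PySem.List.foldl_append_singleton_eq_map _ _ _
    _ = List.replicate w.toList.length '█' := by simp [List.map_const']

theorem pv_blocks_blocks (w : String) : pvBlocks (pvBlocks w) = pvBlocks w := by
  simp [pvBlocks]

theorem pv_blocks_space_free (w : String) : ' ' ∉ (pvBlocks w).toList := by
  simp [pvBlocks]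

theorem pv_lower_blocks (w : String) : PySem.Str.lower (pvBlocks w) = pvBlocks w := by
  simp [PySem.Str.lower, pvBlocks, PySem.Chars.lower, List.map_replicate]
  have : PySem.Chars.lowerChar '█' = '█' := by decide
  rw [this]

theorem pv_no_match_blocks (p w : String) (hp : p ≠ "") (hdom : '█' ∉ p.toList) :
    PySem.Str.isIn p (PySem.Str.lower (pvBlocks w)) = false := by
  rw [pv_lower_blocks]
  rw [PySem.Str.isIn]
  apply (PySem.Chars.isIn_eq_false_iff _ _).mpr
  intro hinf
  simp only [pvBlocks, String.toList_ofList] at hinf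
  have hsub := List.sublist_replicate_iff.mp hinf.sublist
  obtain ⟨k, hk, hrep⟩ := hsub
  match p2 : p.toList, hrep with
  | [], _ => exact hp (by have := congrArg String.ofList p2; simpa using this)
  | c :: t, hrep =>
    apply hdom
    rw [p2] at *
    have : c = '█' := by
      have : c :: t = List.replicate k '█' := hrep
      cases k with
      | zero => simp at this
      | succ k' => simpa [List.replicate_succ] using congrArg (·.head?) this
    simp [this]

-- ==== per-word match flag (proof-side only) ====
def pvHit (pats : List String) (w : String) : Bool :=
  pats.any (fun p => PySem.Str.isIn p (PySem.Str.lower w))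

theorem pvHitP_iff (pats : List String) (w : String) : pvHitP pats w ↔ pvHit pats w = true := by
  unfold pvHitP pvHit
  simp [List.any_eq_true, PySem.Chars.isIn_iff_infix, PySem.Str.toList_lower]

-- ==== trigger recurrence ====
def pvTrigs : List Bool → Bool → List Bool
  | [], _ => []
  | h :: t, prev => (h && !prev) :: pvTrigs t (h && !prev)

theorem pv_length_trigs (hs : List Bool) (prev : Bool) : (pvTrigs hs prev).length = hs.length := by
  induction hs generalizing prev with
  | nil => rfl
  | cons h t ih => simp [pvTrigs, ih]

theorem pv_trigs_getD_zero (hs : List Bool) (prev : Bool) :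
    (pvTrigs hs prev).getD 0 false = (hs.getD 0 false && !prev) := by
  cases hs with
  | nil => simp [pvTrigs]
  | cons h t => simp [pvTrigs]

theorem pv_trigs_getD_succ (hs : List Bool) (prev : Bool) (i : ℕ) (hi : i + 1 < hs.length) :
    (pvTrigs hs prev).getD (i + 1) false
      = (hs.getD (i + 1) false && !((pvTrigs hs prev).getD i false)) := by
  induction hs generalizing prev i with
  | nil => simp at hi
  | cons h t ih =>
    cases i with
    | zero =>
      simp only [pvTrigs, List.getD_cons_succ, List.getD_cons_zero]
      rw [pv_trigs_getD_zero]
    | succ i' =>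
      simp only [pvTrigs, List.getD_cons_succ]
      exact ih _ i' (by simpa using hi)

theorem pv_trigs_imp (hs : List Bool) (prev : Bool) (i : ℕ) :
    (pvTrigs hs prev).getD i false = true → hs.getD i false = true := by
  intro h
  cases i with
  | zero => rw [pv_trigs_getD_zero] at h; exact ((Bool.and_eq_true _ _).mp h).1
  | succ i' =>
    by_cases hi : i' + 1 < hs.length
    · rw [pv_trigs_getD_succ _ _ _ hi] at h; exact ((Bool.and_eq_true _ _).mp h).1
    · rw [List.getD_eq_default] at h
      · exact absurd h (by simp)
      · rw [pv_length_trigs]; omega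

-- ==== run-start characterisation of the trigger recurrence ====
def pvRS (hs : List Bool) (s i : ℕ) : Prop :=
  s ≤ i ∧ (∀ j, s ≤ j → j ≤ i → hs.getD j false = true) ∧ (s = 0 ∨ hs.getD (s-1) false = false)

def pvTP (hs : List Bool) (i : ℕ) : Prop :=
  ∃ s < i+1, (i-s) % 2 = 0 ∧ (∀ j < i+1, s ≤ j → hs.getD j false = true)
    ∧ (s = 0 ∨ hs.getD (s-1) false = false)

theorem pv_TP_iff_RS (hs : List Bool) (i : ℕ) :
    pvTP hs i ↔ ∃ s, pvRS hs s i ∧ (i-s) % 2 = 0 := by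
  constructor
  · rintro ⟨s, hs1, h2, h3, h4⟩
    exact ⟨s, ⟨by omega, fun j hj1 hj2 => h3 j (by omega) hj1, h4⟩, h2⟩
  · rintro ⟨s, ⟨h1, h2, h3⟩, h4⟩
    exact ⟨s, by omega, h4, fun j hj1 hj2 => h2 j hj2 (by omega), h3⟩

theorem pv_RS_exists (hs : List Bool) : ∀ i, hs.getD i false = true →
    ∃ s, pvRS hs s i := by
  intro i
  induction i with
  | zero => intro h; exact ⟨0, le_refl _, fun j h1 h2 => by interval_cases j; exact h, Or.inl rfl⟩
  | succ i' ih =>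
    intro h
    by_cases hp : hs.getD i' false = true
    · obtain ⟨s, h1, h2, h3⟩ := ih hp
      refine ⟨s, by omega, fun j hj1 hj2 => ?_, h3⟩
      rcases Nat.lt_or_ge j (i'+1) with hlt | hge
      · exact h2 j hj1 (by omega)
      · have : j = i' + 1 := by omega
        subst this; exact h
    · refine ⟨i'+1, le_refl _, fun j hj1 hj2 => ?_, Or.inr (by simpa using (Bool.not_eq_true _).mp hp)⟩
      have : j = i' + 1 := by omega
      subst this; exact h

theorem pv_RS_unique (hs : List Bool) (i s1 s2 : ℕ) (h1 : pvRS hs s1 i) (h2 : pvRS hs s2 i) :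
    s1 = s2 := by
  by_contra hne
  rcases Nat.lt_or_ge s1 s2 with hlt | hge
  · obtain ⟨a1, b1, c1⟩ := h1
    obtain ⟨a2, b2, c2⟩ := h2
    rcases c2 with rfl | hc
    · omega
    · have := b1 (s2-1) (by omega) (by omega)
      rw [this] at hc; exact absurd hc (by simp)
  · have hlt : s2 < s1 := by omega
    obtain ⟨a1, b1, c1⟩ := h1
    obtain ⟨a2, b2, c2⟩ := h2
    rcases c1 with rfl | hc
    · omega
    · have := b2 (s1-1) (by omega) (by omega)
      rw [this] at hc; exact absurd hc (by simp)

theorem pv_trig_iff_TP (hs : List Bool) : ∀ i, i < hs.length →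
    ((pvTrigs hs false).getD i false = true ↔ pvTP hs i) := by
  intro i
  induction i with
  | zero =>
    intro hlt
    rw [pv_trigs_getD_zero, pv_TP_iff_RS]
    simp only [Bool.and_eq_true, Bool.not_false, and_true]
    constructor
    · intro h
      exact ⟨0, ⟨le_refl _, fun j h1 h2 => by interval_cases j; exact h, Or.inl rfl⟩, by omega⟩
    · rintro ⟨s, ⟨h1, h2, h3⟩, h4⟩
      have : s = 0 := by omega
      subst this; exact h2 0 (le_refl _) (le_refl _)
  | succ i' ih =>
    intro hlt
    rw [pv_trigs_getD_succ _ _ _ hlt, pv_TP_iff_RS]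
    have ih' := ih (by omega)
    rw [pv_TP_iff_RS] at ih'
    constructor
    · rintro h
      obtain ⟨hhit, hnot⟩ := (Bool.and_eq_true _ _).mp h
      have hnt : ¬ (pvTrigs hs false).getD i' false = true := by simpa using hnot
      by_cases hp : hs.getD i' false = true
      · obtain ⟨s, hrs⟩ := pv_RS_exists hs i' hp
        have hrs1 : pvRS hs s (i'+1) := by
          obtain ⟨a, b, c⟩ := hrs
          refine ⟨by omega, fun j h1 h2 => ?_, c⟩
          rcases Nat.lt_or_ge j (i'+1) with h4 | h4
          · exact b j h1 (by omega)
          · have : j = i'+1 := by omega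
            subst this; exact hhit
        have hodd : (i' - s) % 2 = 1 := by
          by_contra he
          exact hnt (ih'.mpr ⟨s, hrs, by omega⟩)
        exact ⟨s, hrs1, by obtain ⟨a,_,_⟩ := hrs; omega⟩
      · refine ⟨i'+1, ⟨le_refl _, fun j h1 h2 => ?_, Or.inr (by simpa using (Bool.not_eq_true _).mp hp)⟩, by omega⟩
        have : j = i'+1 := by omega
        subst this; exact hhit
    · rintro ⟨s, hrs, hpar⟩
      obtain ⟨h1, h2, h3⟩ := hrs
      have hhit : hs.getD (i'+1) false = true := h2 _ (by omega) (le_refl _)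
      rw [hhit, Bool.true_and]
      rcases Nat.lt_or_ge i' s with hc | hc
      · have hs1 : s = i' + 1 := by omega
        subst hs1
        rcases h3 with h' | h'
        · omega
        · simp only [Nat.add_sub_cancel] at h'
          have : ¬ (pvTrigs hs false).getD i' false = true := fun hcon => by
            rw [pv_trigs_imp hs false i' hcon] at h'
            exact absurd h' (by simp)
          simpa using this
      · have hrs' : pvRS hs s i' := ⟨hc, fun j ha hb => h2 j ha (by omega), h3⟩
        have : ¬ ((pvTrigs hs false).getD i' false = true) := by
          intro hcon
          obtain ⟨s2, hrs2, hpar2⟩ := ih'.mp hcon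
          have := pv_RS_unique hs i' s2 s hrs2 hrs'
          subst this
          omega
        simpa using this

-- ==== render / mask ====
def pvRender (ws : List String) (f : ℕ → Bool) : List String :=
  (List.range ws.length).map (fun j => if f j then pvBlocks (ws.getD j "") else ws.getD j "")

theorem pv_length_render (ws : List String) (f : ℕ → Bool) : (pvRender ws f).length = ws.length := by
  simp [pvRender]

theorem pv_render_congr (ws : List String) (f g : ℕ → Bool)
    (h : ∀ j < ws.length, f j = g j) : pvRender ws f = pvRender ws g := by
  unfold pvRender
  apply List.map_congr_left
  intro j hj
  rw [h j (List.mem_range.mp hj)]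

theorem pv_render_false (ws : List String) : pvRender ws (fun _ => false) = ws := by
  unfold pvRender
  apply List.ext_getElem (by simp)
  intro j h1 h2
  simp [List.getD_eq_getElem?_getD, List.getElem?_eq_getElem h2]

theorem pv_render_getElem (ws : List String) (f : ℕ → Bool) (j : ℕ) (hj : j < ws.length) :
    (pvRender ws f)[j]'(by simp [pv_length_render, hj]) =
      (if f j then pvBlocks (ws.getD j "") else ws.getD j "") := by
  simp [pvRender]

theorem pv_render_getD (ws : List String) (f : ℕ → Bool) (j : ℕ) (hj : j < ws.length) :
    (pvRender ws f).getD j "" = (if f j then pvBlocks (ws.getD j "") else ws.getD j "") := by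
  rw [List.getD_eq_getElem?_getD, List.getElem?_eq_getElem (by simp [pv_length_render, hj])]
  simp [pv_render_getElem ws f j hj]

theorem pv_get_render (ws : List String) (f : ℕ → Bool) (j : ℕ) (hj : j < ws.length) :
    PySem.List.pyGet? (pvRender ws f) (j : Int)
      = some (if f j then pvBlocks (ws.getD j "") else ws.getD j "") := by
  rw [PySem.List.pyGet?_natCast]
  rw [List.getElem?_eq_getElem (by simp [pv_length_render, hj])]
  rw [pv_render_getElem ws f j hj]

theorem pv_set_render (ws : List String) (f : ℕ → Bool) (m : ℕ) (hm : m < ws.length) :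
    (pvRender ws f).set m (pvBlocks (ws.getD m ""))
      = pvRender ws (fun j => decide (j = m) || f j) := by
  apply List.ext_getElem (by simp [pv_length_render])
  intro j h1 h2
  rw [List.getElem_set]
  have hj : j < ws.length := by simpa [pv_length_render] using h2
  by_cases hjm : j = m
  · subst hjm
    rw [if_pos rfl, pv_render_getElem ws _ j hj]
    simp
  · rw [if_neg (fun h => hjm h.symm), pv_render_getElem ws f j (by simpa [pv_length_render] using h1),
        pv_render_getElem ws _ j hj]
    simp [hjm]

theorem pv_render_space_free (ws : List String) (f : ℕ → Bool)
    (h : ∀ w ∈ ws, ' ' ∉ w.toList) : ∀ w ∈ pvRender ws f, ' ' ∉ w.toList := by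
  intro w hw
  unfold pvRender at hw
  obtain ⟨j, hj, rfl⟩ := List.mem_map.mp hw
  by_cases hf : f (j)
  · simp [hf, pv_blocks_space_free]
  · simp only [hf, Bool.false_eq_true, if_false]
    have hjr := List.mem_range.mp hj
    rw [List.getD_eq_getElem?_getD, List.getElem?_eq_getElem hjr]
    exact h _ (List.getElem_mem _)

-- ==== A-side censor primitives on a render ====
theorem pv_censorAt_nat (ws : List String) (m : ℕ) (hm : m < ws.length)
    (hsf : ∀ w ∈ ws, ' ' ∉ w.toList) :
    pvCensorAt ws (m : Int) = some (ws.set m (pvBlocks (ws.getD m ""))) := by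
  unfold pvCensorAt
  rw [PySem.List.pyGet?_natCast, List.getElem?_eq_getElem hm]
  simp only []
  rw [pv_replace_self_str]
  rw [pv_censorer_eq_blocks _ (hsf _ (List.getElem_mem _))]
  rw [PySem.List.pySet?_natCast ws m _ hm]
  congr 3
  rw [List.getD_eq_getElem?_getD, List.getElem?_eq_getElem hm]
  rfl

theorem pv_censorAt_neg_one (ws : List String) (hne : ws ≠ [])
    (hsf : ∀ w ∈ ws, ' ' ∉ w.toList) :
    pvCensorAt ws (-1) = some (ws.set (ws.length - 1) (pvBlocks (ws.getD (ws.length - 1) ""))) := by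
  unfold pvCensorAt
  rw [PySem.List.pyGet?_neg_one]
  rw [List.getLast?_eq_getElem?]
  have hlen : 0 < ws.length := List.length_pos_iff.mpr hne
  rw [List.getElem?_eq_getElem (by omega)]
  simp only []
  rw [pv_replace_self_str]
  rw [pv_censorer_eq_blocks _ (hsf _ (List.getElem_mem _))]
  have hidx : PySem.List.pyIdx? ws.length (-1) = some (ws.length - 1) := by
    unfold PySem.List.pyIdx?
    rw [if_neg (by omega), if_pos (by omega)]
    rfl
  unfold PySem.List.pySet?
  rw [hidx]
  simp only [Option.map_some]
  congr 3
  rw [List.getD_eq_getElem?_getD, List.getElem?_eq_getElem (by omega)]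
  rfl

theorem pv_blocks_render_entry (ws : List String) (f : ℕ → Bool) (m : ℕ) (hm : m < ws.length) :
    pvBlocks ((pvRender ws f).getD m "") = pvBlocks (ws.getD m "") := by
  rw [pv_render_getD ws f m hm]
  by_cases h : f m
  · rw [if_pos h, pv_blocks_blocks]
  · rw [if_neg h]

theorem pv_inner_noop (pats : List String) (ws : List String) (k : Int) (wcur : String)
    (hget : PySem.List.pyGet? ws k = some wcur)
    (hno : ∀ p ∈ pats, PySem.Str.isIn p (PySem.Str.lower wcur) = false) :
    pvStepA pats k ws = some ws := by
  unfold pvStepA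
  induction pats with
  | nil => rfl
  | cons p rest ih =>
    rw [List.foldl_cons]
    simp only [Option.bind_some] at *
    rw [hget]
    simp only []
    rw [hno p List.mem_cons_self]
    simp only [Bool.false_eq_true, if_false]
    exact ih (fun q hq => hno q (List.mem_cons_of_mem _ hq))

theorem pv_inner_fire (pats : List String) (ws ws' : List String) (k : Int) (wcur wcur' : String)
    (hget : PySem.List.pyGet? ws k = some wcur)
    (hmatch : ∃ p ∈ pats, PySem.Str.isIn p (PySem.Str.lower wcur) = true)
    (htriple : (pvCensorAt ws (k - 1)).bind
      (fun ws2 => (pvCensorAt ws2 k).bind (fun ws3 => pvCensorAt ws3 (k + 1))) = some ws')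
    (hget' : PySem.List.pyGet? ws' k = some wcur')
    (hnom : ∀ p ∈ pats, PySem.Str.isIn p (PySem.Str.lower wcur') = false) :
    pvStepA pats k ws = some ws' := by
  induction pats with
  | nil => obtain ⟨p, hp, _⟩ := hmatch; exact absurd hp (List.not_mem_nil)
  | cons p rest ih =>
    unfold pvStepA
    rw [List.foldl_cons]
    simp only [Option.bind_some]
    rw [hget]
    simp only []
    by_cases hm : PySem.Str.isIn p (PySem.Str.lower wcur) = true
    · rw [hm]
      simp only [if_true]
      rw [htriple]
      have := pv_inner_noop rest ws' k wcur' hget' (fun q hq => hnom q (List.mem_cons_of_mem _ hq))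
      unfold pvStepA at this
      exact this
    · rw [(Bool.not_eq_true _).mp hm]
      simp only [Bool.false_eq_true, if_false]
      have hmatch' : ∃ q ∈ rest, PySem.Str.isIn q (PySem.Str.lower wcur) = true := by
        obtain ⟨q, hq, hqq⟩ := hmatch
        rcases List.mem_cons.mp hq with rfl | hq'
        · exact absurd hqq hm
        · exact ⟨q, hq', hqq⟩
      have := ih hmatch' (fun q hq => hnom q (List.mem_cons_of_mem _ hq))
      unfold pvStepA at this
      exact this

-- contribution of a fire at word k to A's mask at word j (j < n)
def pvCtr (t : List Bool) (n k j : ℕ) : Bool :=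
  t.getD k false &&
    (decide (j = k+1) || (decide (k ≤ n-2) && (decide (j = k) || decide (j+1 = k)))
      || (decide (k = 0) && decide (2 ≤ n) && decide (j = n-1)))

def pvMaskA (t : List Bool) (n i j : ℕ) : Bool := (List.range i).any (fun k => pvCtr t n k j)

theorem pv_maskA_zero (t : List Bool) (n j : ℕ) : pvMaskA t n 0 j = false := by simp [pvMaskA]

theorem pv_maskA_succ (t : List Bool) (n k j : ℕ) :
    pvMaskA t n (k+1) j = (pvMaskA t n k j || pvCtr t n k j) := by
  unfold pvMaskA
  rw [List.range_succ, List.any_append]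
  simp

theorem pv_ctr_false_of_not_trig (t : List Bool) (n k j : ℕ) (h : t.getD k false = false) :
    pvCtr t n k j = false := by
  unfold pvCtr; rw [h]; simp

theorem pv_ctr_false_last (t : List Bool) (n j : ℕ) (hn : 2 ≤ n) (hj : j < n) :
    pvCtr t n (n-1) j = false := by
  rw [Bool.eq_false_iff]
  intro hcon
  unfold pvCtr at hcon
  simp only [Bool.and_eq_true, Bool.or_eq_true, decide_eq_true_eq] at hcon
  obtain ⟨ht, hc⟩ := hcon
  rcases hc with (h | ⟨h1, h2 | h2⟩) | ⟨⟨h0, h2⟩, h3⟩ <;> omega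

theorem pv_maskA_self (t : List Bool) (n k : ℕ) (hk : k < n) :
    pvMaskA t n k k = ((decide (1 ≤ k) && t.getD (k-1) false)
      || (decide (0 < k) && decide (2 ≤ n) && decide (k = n-1) && t.getD 0 false)) := by
  rw [Bool.eq_iff_iff]
  unfold pvMaskA pvCtr
  simp only [List.any_eq_true, List.mem_range, Bool.or_eq_true, Bool.and_eq_true,
    decide_eq_true_eq]
  constructor
  · rintro ⟨k', hk', ht, (h | ⟨hle, h | h⟩) | ⟨⟨h0, h2⟩, hj⟩⟩
    · left
      refine ⟨by omega, ?_⟩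
      have : k' = k - 1 := by omega
      subst this; exact ht
    · omega
    · omega
    · subst h0
      exact Or.inr ⟨⟨⟨by omega, h2⟩, hj⟩, ht⟩
  · rintro (⟨h1, ht⟩ | ⟨⟨⟨h0, h2⟩, hj⟩, ht⟩)
    · exact ⟨k-1, by omega, ht, Or.inl (Or.inl (by omega))⟩
    · exact ⟨0, by omega, ht, Or.inr ⟨⟨rfl, h2⟩, hj⟩⟩

theorem pv_mask_fire (t : List Bool) (n k j : ℕ) (hk1 : k + 1 < n) (hj : j < n)
    (ht : t.getD k false = true) :
    (decide (j = k+1) || (decide (j = k) || (decide (j = (if k = 0 then n-1 else k-1)) || pvMaskA t n k j)))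
      = pvMaskA t n (k+1) j := by
  rw [pv_maskA_succ]
  unfold pvCtr
  rw [ht]
  by_cases h0 : k = 0
  · subst h0
    cases hm : pvMaskA t n 0 j
    · rw [Bool.eq_iff_iff]
      rw [if_pos rfl]
      simp only [Bool.true_and, Bool.or_false, Bool.false_or, Bool.or_eq_true,
        Bool.and_eq_true, decide_eq_true_eq, true_and, and_true]
      omega
    · simp
  · cases hm : pvMaskA t n k j
    · rw [Bool.eq_iff_iff]
      rw [if_neg h0]
      simp only [Bool.true_and, Bool.or_false, Bool.false_or, Bool.or_eq_true,
        Bool.and_eq_true, decide_eq_true_eq, true_and, and_true]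
      omega
    · simp

theorem pv_getD_map_hit (ws pats : List String) (k : ℕ) (hk : k < ws.length) :
    (ws.map (pvHit pats)).getD k false = pvHit pats (ws.getD k "") := by
  rw [List.getD_eq_getElem?_getD, List.getD_eq_getElem?_getD, List.getElem?_map,
    List.getElem?_eq_getElem hk]
  rfl

-- one outer iteration of A, on the censored state after k iterations
theorem pv_stepA_render (ws0 pats : List String)
    (Hsf : ∀ w ∈ ws0, ' ' ∉ w.toList)
    (Hp : ∀ p ∈ pats, p ≠ "" ∧ '█' ∉ p.toList)
    (k : ℕ) (hk : k < ws0.length)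
    (Hlast : k = ws0.length - 1 →
      ((ws0.map (pvHit pats)).getD k false = false
        ∨ pvMaskA (pvTrigs (ws0.map (pvHit pats)) false) ws0.length k k = true)) :
    pvStepA pats (k : Int) (pvRender ws0 (pvMaskA (pvTrigs (ws0.map (pvHit pats)) false) ws0.length k))
      = some (pvRender ws0 (pvMaskA (pvTrigs (ws0.map (pvHit pats)) false) ws0.length (k+1))) := by
  set n := ws0.length with hn
  set hsl := ws0.map (pvHit pats) with hhsl
  set t := pvTrigs hsl false with htdef
  have hlt : t.length = hsl.length := pv_length_trigs _ _
  have hlh : hsl.length = n := by rw [hhsl]; exact List.length_map ..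
  set wk := ws0.getD k "" with hwk
  have hwmem : wk ∈ ws0 := by
    rw [hwk, List.getD_eq_getElem?_getD, List.getElem?_eq_getElem hk]
    exact List.getElem_mem _
  have hhk : hsl.getD k false = pvHit pats wk := pv_getD_map_hit ws0 pats k hk
  have hrsf : ∀ f, ∀ w ∈ pvRender ws0 f, ' ' ∉ w.toList := fun f => pv_render_space_free ws0 f Hsf
  have hget := pv_get_render ws0 (pvMaskA t n k) k hk
  by_cases hc : pvMaskA t n k k = true
  case pos =>
    rw [hc] at hget
    simp only [if_true] at hget
    rw [pv_inner_noop pats _ (k : Int) _ hget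
      (fun p hp => pv_no_match_blocks p wk (Hp p hp).1 (Hp p hp).2)]
    congr 1
    apply pv_render_congr
    intro j hj
    rw [pv_maskA_succ]
    by_cases hkl : k = n - 1
    · by_cases hn1 : 2 ≤ n
      · rw [hkl, pv_ctr_false_last t n j hn1 hj]; simp
      · exfalso
        have h1 : n = 1 := by omega
        have h0 : k = 0 := by omega
        rw [pv_maskA_self t n k hk] at hc
        rw [h0] at hc
        simp [h1] at hc
    · have hk1 : 1 ≤ k ∧ t.getD (k-1) false = true := by
        rw [pv_maskA_self t n k hk] at hc
        rcases (Bool.or_eq_true ..).mp hc with h | h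
        · rcases (Bool.and_eq_true ..).mp h with ⟨h1, h2⟩
          exact ⟨of_decide_eq_true h1, h2⟩
        · exfalso
          rcases (Bool.and_eq_true ..).mp h with ⟨h1, _⟩
          rcases (Bool.and_eq_true ..).mp h1 with ⟨h3, h4⟩
          exact hkl (of_decide_eq_true h4)
      have htk : t.getD k false = false := by
        obtain ⟨h1, h2⟩ := hk1
        have hkk : k - 1 + 1 = k := by omega
        have := pv_trigs_getD_succ hsl false (k-1) (by omega)
        rw [hkk] at this
        rw [htdef, this, h2]
        simp
      rw [pv_ctr_false_of_not_trig t n k j htk]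
      simp
  case neg =>
    rw [Bool.not_eq_true] at hc
    rw [hc] at hget
    simp only [Bool.false_eq_true, if_false] at hget
    by_cases hh : pvHit pats wk = true
    case neg =>
      rw [Bool.not_eq_true] at hh
      have hno : ∀ p ∈ pats, PySem.Str.isIn p (PySem.Str.lower wk) = false := by
        intro p hp
        have := List.any_eq_false.mp (by rw [← pvHit]; exact hh)
        simpa using this p hp
      rw [pv_inner_noop pats _ (k : Int) _ hget hno]
      congr 1
      apply pv_render_congr
      intro j hj
      rw [pv_maskA_succ]
      have htk : t.getD k false = false := by
        cases hk0 : k with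
        | zero =>
          rw [hk0] at hhk
          rw [htdef, pv_trigs_getD_zero, hhk, hh]; rfl
        | succ k' =>
          rw [hk0] at hhk
          have := pv_trigs_getD_succ hsl false k' (by omega)
          rw [htdef, this, hhk, hh]; rfl
      rw [pv_ctr_false_of_not_trig t n k j htk]
      simp
    case pos =>
      have hklast : k ≠ n - 1 := by
        intro h
        rcases Hlast h with h' | h'
        · rw [hhk, hh] at h'; exact absurd h' (by simp)
        · rw [h'] at hc; exact absurd hc (by simp)
      have hk1n : k + 1 < n := by omega
      have htk : t.getD k false = true := by
        cases hk0 : k with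
        | zero =>
          rw [hk0] at hhk
          rw [htdef, pv_trigs_getD_zero, hhk, hh]; rfl
        | succ k' =>
          have hrec := pv_trigs_getD_succ hsl false k' (by omega)
          have hprev : t.getD k' false = false := by
            rw [pv_maskA_self t n k hk] at hc
            have h1 : (decide (1 ≤ k) && t.getD (k-1) false) = false := by
              rcases (Bool.or_eq_false_iff ..).mp hc with ⟨h1, _⟩
              exact h1
            rw [hk0] at h1
            simpa using h1
          rw [hk0] at hhk
          rw [htdef, hrec, hhk, hh]
          rw [htdef] at hprev
          rw [hprev]
          rfl
      have hnom : ∀ p ∈ pats, PySem.Str.isIn p (PySem.Str.lower (pvBlocks wk)) = false :=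
        fun p hp => pv_no_match_blocks p wk (Hp p hp).1 (Hp p hp).2
      have hmatch : ∃ p ∈ pats, PySem.Str.isIn p (PySem.Str.lower wk) = true :=
        List.any_eq_true.mp (by rw [← pvHit]; exact hh)
      have step1 : pvCensorAt (pvRender ws0 (pvMaskA t n k)) ((k : Int) - 1)
          = some (pvRender ws0 (fun j => decide (j = (if k = 0 then n-1 else k-1)) || pvMaskA t n k j)) := by
        by_cases hk0 : k = 0
        · subst hk0
          have hcast : ((0 : ℕ) : Int) - 1 = -1 := by norm_num
          rw [hcast]
          have hn0 : 0 < ws0.length := by omega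
          rw [pv_censorAt_neg_one _ (by
              apply List.ne_nil_of_length_pos
              rw [pv_length_render]
              exact hn0) (hrsf _)]
          rw [pv_length_render]
          rw [pv_blocks_render_entry ws0 _ (n-1) (by omega)]
          rw [pv_set_render ws0 _ (n-1) (by omega)]
          simp
        · have hcast : (k : Int) - 1 = ((k - 1 : ℕ) : Int) := by omega
          rw [hcast]
          rw [pv_censorAt_nat _ (k-1) (by rw [pv_length_render]; omega) (hrsf _)]
          rw [pv_blocks_render_entry ws0 _ (k-1) (by omega)]
          rw [pv_set_render ws0 _ (k-1) (by omega)]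
          simp [hk0]
      have step2 : pvCensorAt (pvRender ws0 (fun j => decide (j = (if k = 0 then n-1 else k-1)) || pvMaskA t n k j)) (k : Int)
          = some (pvRender ws0 (fun j => decide (j = k) || (decide (j = (if k = 0 then n-1 else k-1)) || pvMaskA t n k j))) := by
        rw [pv_censorAt_nat _ k (by rw [pv_length_render]; omega) (hrsf _)]
        rw [pv_blocks_render_entry ws0 _ k hk]
        rw [pv_set_render ws0 _ k hk]
      have step3 : pvCensorAt (pvRender ws0 (fun j => decide (j = k) || (decide (j = (if k = 0 then n-1 else k-1)) || pvMaskA t n k j))) ((k : Int) + 1)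
          = some (pvRender ws0 (fun j => decide (j = k+1) || (decide (j = k) || (decide (j = (if k = 0 then n-1 else k-1)) || pvMaskA t n k j)))) := by
        have hcast : (k : Int) + 1 = ((k + 1 : ℕ) : Int) := by omega
        rw [hcast]
        rw [pv_censorAt_nat _ (k+1) (by rw [pv_length_render]; omega) (hrsf _)]
        rw [pv_blocks_render_entry ws0 _ (k+1) (by omega)]
        rw [pv_set_render ws0 _ (k+1) (by omega)]
      have htriple : (pvCensorAt (pvRender ws0 (pvMaskA t n k)) ((k : Int) - 1)).bind
          (fun ws2 => (pvCensorAt ws2 (k : Int)).bind (fun ws3 => pvCensorAt ws3 ((k : Int) + 1)))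
          = some (pvRender ws0 (fun j => decide (j = k+1) || (decide (j = k) || (decide (j = (if k = 0 then n-1 else k-1)) || pvMaskA t n k j)))) := by
        rw [step1, Option.bind_some, step2, Option.bind_some, step3]
      have hget' : PySem.List.pyGet? (pvRender ws0 (fun j => decide (j = k+1) || (decide (j = k) || (decide (j = (if k = 0 then n-1 else k-1)) || pvMaskA t n k j)))) (k : Int)
          = some (pvBlocks wk) := by
        rw [pv_get_render ws0 _ k hk]
        simp [hwk, List.getD_eq_getElem?_getD]
      rw [pv_inner_fire pats _ _ (k : Int) wk (pvBlocks wk) hget hmatch htriple hget' hnom]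
      congr 1
      apply pv_render_congr
      intro j hj
      exact pv_mask_fire t n k j hk1n hj htk

-- A's outer loop: after K iterations the state is the render of the mask after K fires
theorem pv_loopA (ws0 pats : List String)
    (Hsf : ∀ w ∈ ws0, ' ' ∉ w.toList)
    (Hp : ∀ p ∈ pats, p ≠ "" ∧ '█' ∉ p.toList)
    (HlastG : (ws0.map (pvHit pats)).getD (ws0.length - 1) false = true →
      pvMaskA (pvTrigs (ws0.map (pvHit pats)) false) ws0.length (ws0.length - 1) (ws0.length - 1) = true) :
    ∀ K, K ≤ ws0.length →
    (PySem.List.pyRange 0 (K : Int) 1).foldl (fun acc i => acc.bind (pvStepA pats i)) (some ws0)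
      = some (pvRender ws0 (pvMaskA (pvTrigs (ws0.map (pvHit pats)) false) ws0.length K)) := by
  intro K
  induction K with
  | zero =>
    intro _
    rw [PySem.List.pyRange_zero_natCast]
    simp only [List.range_zero, List.map_nil, List.foldl_nil]
    congr 1
    have h1 : pvRender ws0 (pvMaskA (pvTrigs (ws0.map (pvHit pats)) false) ws0.length 0)
        = pvRender ws0 (fun _ => false) :=
      pv_render_congr _ _ _ (fun j hj => pv_maskA_zero _ _ _)
    rw [h1, pv_render_false]
  | succ K ih =>
    intro hK
    rw [PySem.List.pyRange_zero_natCast, List.range_succ, List.map_append, List.foldl_append]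
    rw [← PySem.List.pyRange_zero_natCast, ih (by omega)]
    simp only [List.map_cons, List.map_nil, List.foldl_cons, List.foldl_nil, Option.bind_some]
    exact pv_stepA_render ws0 pats Hsf Hp K (by omega)
      (fun hlast => by
        by_cases hhit : (ws0.map (pvHit pats)).getD K false = true
        · right
          rw [hlast] at hhit ⊢
          exact HlastG hhit
        · left
          exact (Bool.not_eq_true _).mp hhit)

-- A's word-splitting double loop builds pvWords
theorem pv_ewords (email : String) :
    (pvSplitStr email " ").foldl
      (fun acc x => (pvSplitStr x "\n").foldl (fun acc2 w => acc2 ++ [w]) acc) []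
      = pvWords email := by
  unfold pvWords
  trans (pvSplitStr email " ").foldl (fun acc x => acc ++ pvSplitStr x "\n") []
  · exact PySem.List.foldl_congr_mem _ _ _ _ (fun acc x _ => PySem.List.foldl_append_singleton_eq_self _ _)
  · rw [PySem.List.foldl_append_eq_flatMap]
    simp

-- ==== the spec-side word list equals the ports' word list ====
theorem pv_modifyHead_triv (S : List (List Char)) : List.modifyHead (fun x => x) S = S := by
  cases S <;> simp

theorem pv_splitOn_go_eq (c : Char) :
    ∀ (fuel : ℕ) (l cur : List Char) (acc : List (List Char)), l.length ≤ fuel →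
    PySem.Chars.splitOn.go [c] fuel l cur acc
      = acc.reverse ++ List.modifyHead (fun x => cur.reverse ++ x) (l.splitOnP (fun x => x = c)) := by
  intro fuel
  induction fuel with
  | zero =>
    intro l cur acc hlen
    have hl0 : l = [] := List.length_eq_zero_iff.mp (Nat.le_zero.mp hlen)
    subst hl0
    rw [PySem.Chars.splitOn.go.eq_def]
    simp [List.splitOnP_nil]
  | succ f ih =>
    intro l cur acc hlen
    match l with
    | [] =>
      rw [PySem.Chars.splitOn.go.eq_def]
      simp [List.splitOnP_nil]
    | a :: rest =>
      rw [PySem.Chars.splitOn.go.eq_def]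
      simp only []
      by_cases hac : a = c
      · have hpre : List.isPrefixOf [c] (a :: rest) = true := by
          apply List.isPrefixOf_iff_prefix.mpr
          exact List.cons_prefix_cons.mpr ⟨hac.symm, List.nil_prefix⟩
        rw [if_pos hpre]
        rw [show List.drop [c].length (a :: rest) = rest from rfl]
        rw [ih rest [] (cur.reverse :: acc) (by simp at hlen ⊢; omega)]
        rw [List.splitOnP_cons]
        rw [if_pos (by simp [hac])]
        simp [pv_modifyHead_triv]
      · have hpre : ¬ List.isPrefixOf [c] (a :: rest) = true := by
          intro h
          rcases List.cons_prefix_cons.mp (List.isPrefixOf_iff_prefix.mp h) with ⟨h1, _⟩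
          exact hac h1.symm
        rw [if_neg hpre]
        rw [ih rest (a :: cur) acc (by simp at hlen ⊢; omega)]
        rw [List.splitOnP_cons]
        rw [if_neg (by simp [hac])]
        rw [List.modifyHead_modifyHead]
        simp [Function.comp_def]

theorem pv_splitOn_eq_splitOnP (l : List Char) (c : Char) :
    PySem.Chars.splitOn l [c] = l.splitOnP (fun x => x = c) := by
  show PySem.Chars.splitOn.go [c] (l.length + 1) l [] [] = _
  rw [pv_splitOn_go_eq c (l.length + 1) l [] [] (by omega)]
  simp only [List.reverse_nil, List.nil_append]
  exact pv_modifyHead_triv _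

theorem pv_splitOnP_comp (p q : Char → Bool) :
    ∀ (l : List Char),
    (l.splitOnP p).flatMap (fun part => part.splitOnP q) = l.splitOnP (fun x => p x || q x) := by
  intro l
  induction l with
  | nil => simp [List.splitOnP_nil]
  | cons a l ih =>
    rw [List.splitOnP_cons, List.splitOnP_cons]
    by_cases hp : p a = true
    · rw [if_pos hp, if_pos (by simp [hp])]
      rw [List.flatMap_cons, ih]
      simp [List.splitOnP_nil]
    · rw [if_neg hp]
      obtain ⟨h, t, hht⟩ := List.exists_cons_of_ne_nil (List.splitOnP_ne_nil p l)
      rw [hht]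
      rw [hht, List.flatMap_cons] at ih
      simp only [List.modifyHead_cons, List.flatMap_cons]
      rw [List.splitOnP_cons]
      by_cases hq : q a = true
      · rw [if_pos hq, if_pos (by simp [hq])]
        rw [← ih]
        simp
      · rw [if_neg hq, if_neg (by simp [hp, hq])]
        rw [← ih]
        obtain ⟨h2, t2, hht2⟩ := List.exists_cons_of_ne_nil (List.splitOnP_ne_nil q h)
        rw [hht2]
        simp

theorem pv_emailWords_eq (email : String) : pvEmailWords email = pvWords email := by
  unfold pvEmailWords pvWords pvSplitStr
  rw [List.flatMap_map]
  have hstep : (fun s : List Char => (PySem.Chars.splitOn (String.ofList s).toList ("\n" : String).toList).map String.ofList)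
      = fun s : List Char => (s.splitOnP (fun x => x = '\n')).map String.ofList := by
    funext s
    rw [String.toList_ofList]
    have : ("\n" : String).toList = ['\n'] := rfl
    rw [this, pv_splitOn_eq_splitOnP]
  rw [hstep]
  have hsp : (" " : String).toList = [' '] := rfl
  rw [hsp, pv_splitOn_eq_splitOnP]
  rw [← List.map_flatMap]
  rw [pv_splitOnP_comp]

-- ==== B-side: the mask loop maintains the same pvMaskA mask as A's censored state ====
theorem pv_set_map_range (n m : ℕ) (b : Bool) (f : ℕ → Bool) :
    ((List.range n).map f).set m b = (List.range n).map (fun j => if j = m then b else f j) := by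
  apply List.ext_getElem (by simp)
  intro j h1 h2
  rw [List.getElem_set]
  by_cases h : m = j
  · subst h; simp
  · have hne : j ≠ m := fun hh => h hh.symm
    simp [h, hne]

theorem pv_getD_map_range (n k : ℕ) (f : ℕ → Bool) (hk : k < n) :
    PySem.List.pyGetD ((List.range n).map f) (k : Int) false = f k := by
  rw [PySem.List.pyGetD_natCast]
  rw [List.getD_eq_getElem?_getD, List.getElem?_eq_getElem (by simp [hk])]
  simp

theorem pv_pySet_map_range_nat (n m : ℕ) (f : ℕ → Bool) (hm : m < n) :
    PySem.List.pySet? ((List.range n).map f) (m : Int) true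
      = some ((List.range n).map (fun j => decide (j = m) || f j)) := by
  rw [PySem.List.pySet?_natCast _ m _ (by simp [hm])]
  rw [pv_set_map_range]
  congr 1
  apply List.map_congr_left
  intro j hj
  by_cases h : j = m <;> simp [h]

theorem pv_pySet_map_range_neg_one (n : ℕ) (f : ℕ → Bool) (hn : 0 < n) :
    PySem.List.pySet? ((List.range n).map f) (-1) true
      = some ((List.range n).map (fun j => decide (j = n - 1) || f j)) := by
  unfold PySem.List.pySet?
  simp only [List.length_map, List.length_range]
  have hidx : PySem.List.pyIdx? n (-1) = some (n - 1) := by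
    unfold PySem.List.pyIdx?
    rw [if_neg (by omega), if_pos (by omega)]
    rfl
  rw [hidx]
  simp only [Option.map_some]
  rw [pv_set_map_range]
  congr 1
  apply List.map_congr_left
  intro j hj
  by_cases h : j = n - 1 <;> simp [h]

-- B's loop body at word k, on the mask after k iterations
theorem pv_stepB_mask (ws0 pats : List String)
    (k : ℕ) (hk : k < ws0.length)
    (Hlast : k = ws0.length - 1 →
      ((ws0.map (pvHit pats)).getD k false = false
        ∨ pvMaskA (pvTrigs (ws0.map (pvHit pats)) false) ws0.length k k = true)) :
    pvStepB pats ws0 (k : Int)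
        ((List.range ws0.length).map (pvMaskA (pvTrigs (ws0.map (pvHit pats)) false) ws0.length k))
      = some ((List.range ws0.length).map (pvMaskA (pvTrigs (ws0.map (pvHit pats)) false) ws0.length (k+1))) := by
  set n := ws0.length with hn
  set hsl := ws0.map (pvHit pats) with hhsl
  set t := pvTrigs hsl false with htdef
  have hlt : t.length = hsl.length := pv_length_trigs _ _
  have hlh : hsl.length = n := by rw [hhsl]; exact List.length_map ..
  set wk := ws0.getD k "" with hwk
  have hhk : hsl.getD k false = pvHit pats wk := pv_getD_map_hit ws0 pats k hk
  unfold pvStepB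
  rw [pv_getD_map_range n k _ hk]
  have hwg : PySem.List.pyGetD ws0 (k : Int) "" = wk := by
    rw [PySem.List.pyGetD_natCast]
  rw [hwg]
  have hcond : pats.any (fun p => PySem.Str.isIn p (PySem.Str.lower wk)) = pvHit pats wk := rfl
  rw [hcond]
  by_cases hc : pvMaskA t n k k = true
  case pos =>
    rw [hc]
    simp only [Bool.not_true, Bool.false_and, Bool.false_eq_true, if_false]
    congr 1
    apply List.map_congr_left
    intro j hjr
    have hj : j < n := List.mem_range.mp hjr
    rw [pv_maskA_succ]
    by_cases hkl : k = n - 1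
    · by_cases hn1 : 2 ≤ n
      · rw [hkl, pv_ctr_false_last t n j hn1 hj]; simp
      · exfalso
        have h1 : n = 1 := by omega
        have h0 : k = 0 := by omega
        rw [pv_maskA_self t n k hk] at hc
        rw [h0] at hc
        simp [h1] at hc
    · have hk1 : 1 ≤ k ∧ t.getD (k-1) false = true := by
        rw [pv_maskA_self t n k hk] at hc
        rcases (Bool.or_eq_true ..).mp hc with h | h
        · rcases (Bool.and_eq_true ..).mp h with ⟨h1, h2⟩
          exact ⟨of_decide_eq_true h1, h2⟩
        · exfalso
          rcases (Bool.and_eq_true ..).mp h with ⟨h1, _⟩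
          rcases (Bool.and_eq_true ..).mp h1 with ⟨h3, h4⟩
          exact hkl (of_decide_eq_true h4)
      have htk : t.getD k false = false := by
        obtain ⟨h1, h2⟩ := hk1
        have hkk : k - 1 + 1 = k := by omega
        have := pv_trigs_getD_succ hsl false (k-1) (by omega)
        rw [hkk] at this
        rw [htdef, this, h2]
        simp
      rw [pv_ctr_false_of_not_trig t n k j htk]
      simp
  case neg =>
    rw [Bool.not_eq_true] at hc
    rw [hc]
    simp only [Bool.not_false, Bool.true_and]
    by_cases hh : pvHit pats wk = true
    case neg =>
      rw [Bool.not_eq_true] at hh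
      rw [hh]
      simp only [Bool.false_eq_true, if_false]
      congr 1
      apply List.map_congr_left
      intro j hjr
      have hj : j < n := List.mem_range.mp hjr
      rw [pv_maskA_succ]
      have htk : t.getD k false = false := by
        cases hk0 : k with
        | zero =>
          rw [hk0] at hhk
          rw [htdef, pv_trigs_getD_zero, hhk, hh]; rfl
        | succ k' =>
          rw [hk0] at hhk
          have := pv_trigs_getD_succ hsl false k' (by omega)
          rw [htdef, this, hhk, hh]; rfl
      rw [pv_ctr_false_of_not_trig t n k j htk]
      simp
    case pos =>
      rw [hh]
      simp only [if_true]
      have hklast : k ≠ n - 1 := by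
        intro h
        rcases Hlast h with h' | h'
        · rw [hhk, hh] at h'; exact absurd h' (by simp)
        · rw [h'] at hc; exact absurd hc (by simp)
      have hk1n : k + 1 < n := by omega
      have htk : t.getD k false = true := by
        cases hk0 : k with
        | zero =>
          rw [hk0] at hhk
          rw [htdef, pv_trigs_getD_zero, hhk, hh]; rfl
        | succ k' =>
          have hrec := pv_trigs_getD_succ hsl false k' (by omega)
          have hprev : t.getD k' false = false := by
            rw [pv_maskA_self t n k hk] at hc
            have h1 : (decide (1 ≤ k) && t.getD (k-1) false) = false := by
              rcases (Bool.or_eq_false_iff ..).mp hc with ⟨h1, _⟩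
              exact h1
            rw [hk0] at h1
            simpa using h1
          rw [hk0] at hhk
          rw [htdef, hrec, hhk, hh]
          rw [htdef] at hprev
          rw [hprev]
          rfl
      simp only [List.foldl_cons, List.foldl_nil, Option.bind_some]
      have step1 : PySem.List.pySet? ((List.range n).map (pvMaskA t n k)) ((k : Int) - 1) true
          = some ((List.range n).map (fun j => decide (j = (if k = 0 then n-1 else k-1)) || pvMaskA t n k j)) := by
        by_cases hk0 : k = 0
        · subst hk0
          have hcast : ((0 : ℕ) : Int) - 1 = -1 := by norm_num
          rw [hcast, pv_pySet_map_range_neg_one n _ (by omega)]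
          simp
        · have hcast : (k : Int) - 1 = ((k - 1 : ℕ) : Int) := by omega
          rw [hcast, pv_pySet_map_range_nat n (k-1) _ (by omega)]
          simp [hk0]
      rw [step1, Option.bind_some]
      rw [pv_pySet_map_range_nat n k _ hk, Option.bind_some]
      have hcast1 : (k : Int) + 1 = ((k + 1 : ℕ) : Int) := by omega
      rw [hcast1, pv_pySet_map_range_nat n (k+1) _ (by omega)]
      congr 1
      apply List.map_congr_left
      intro j hjr
      have hj : j < n := List.mem_range.mp hjr
      exact pv_mask_fire t n k j hk1n hj htk

-- B's loop: after K iterations the mask is pvMaskA after K fires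
theorem pv_loopB (ws0 pats : List String)
    (HlastG : (ws0.map (pvHit pats)).getD (ws0.length - 1) false = true →
      pvMaskA (pvTrigs (ws0.map (pvHit pats)) false) ws0.length (ws0.length - 1) (ws0.length - 1) = true) :
    ∀ K, K ≤ ws0.length →
    (PySem.List.pyRange 0 (K : Int) 1).foldl (fun acc i => acc.bind (pvStepB pats ws0 i))
        (some (List.replicate ws0.length false))
      = some ((List.range ws0.length).map
          (pvMaskA (pvTrigs (ws0.map (pvHit pats)) false) ws0.length K)) := by
  intro K
  induction K with
  | zero =>
    intro _
    rw [PySem.List.pyRange_zero_natCast]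
    simp only [List.range_zero, List.map_nil, List.foldl_nil]
    congr 1
    apply List.ext_getElem (by simp)
    intro j hj1 hj2
    simp [pv_maskA_zero]
  | succ K ih =>
    intro hK
    rw [PySem.List.pyRange_zero_natCast, List.range_succ, List.map_append, List.foldl_append]
    rw [← PySem.List.pyRange_zero_natCast, ih (by omega)]
    simp only [List.map_cons, List.map_nil, List.foldl_cons, List.foldl_nil, Option.bind_some]
    exact pv_stepB_mask ws0 pats K (by omega)
      (fun hlast => by
        by_cases hhit : (ws0.map (pvHit pats)).getD K false = true
        · right
          rw [hlast] at hhit ⊢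
          exact HlastG hhit
        · left
          exact (Bool.not_eq_true _).mp hhit)

-- B computes the render of the same final mask
set_option maxHeartbeats 1000000 in
theorem pv_B_eq (email : String) (censored_list negative_words : List String)
    (HlastG : ((pvWords email).map (pvHit (censored_list ++ negative_words))).getD ((pvWords email).length - 1) false = true →
      pvMaskA (pvTrigs ((pvWords email).map (pvHit (censored_list ++ negative_words))) false)
        (pvWords email).length ((pvWords email).length - 1) ((pvWords email).length - 1) = true) :
    censor_four_alt email censored_list negative_words
      = PySem.Str.join " " (pvRender (pvWords email)
          (pvMaskA (pvTrigs ((pvWords email).map (pvHit (censored_list ++ negative_words))) false)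
            (pvWords email).length (pvWords email).length)) := by
  unfold censor_four_alt
  dsimp only
  set pats := censored_list ++ negative_words with hpats
  set ws := pvWords email with hws
  have hwords : (pvSplitStr email " ").flatMap (fun part => pvSplitStr part "\n") = ws := rfl
  rw [hwords]
  set n := ws.length with hn
  set hs := ws.map (pvHit pats) with hhs
  set t := pvTrigs hs false with htdef
  rw [pv_loopB ws pats HlastG n (le_refl _)]
  dsimp only
  congr 1
  apply List.ext_getElem (by simp [pv_length_render])
  intro j h1 h2
  have hj : j < n := by simpa using h1
  rw [pv_render_getElem ws _ j hj]
  rw [List.getElem_map]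
  have hzj : (ws.zip ((List.range n).map fun j => pvMaskA t n n j))[j]'(by
        simp only [List.length_zip, List.length_map, List.length_range]; omega)
      = (ws[j]'hj, pvMaskA t n n j) := by
    rw [List.getElem_zip]
    simp
  rw [hzj]
  simp only []
  have hgd : ws.getD j "" = ws[j]'hj := by
    rw [List.getD_eq_getElem?_getD, List.getElem?_eq_getElem hj]
    rfl
  rw [hgd]
  rfl

-- pvTrigP (the run-parity closed form over words) matches pvTP (over the hit list)
theorem pv_trigP_iff (pats ws : List String) (i : ℕ) (hi : i < ws.length) :
    pvTrigP pats ws i ↔ pvTP (ws.map (pvHit pats)) i := by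
  have hAt : ∀ j, j < ws.length →
      (pvHitP pats (ws.getD j "") ↔ (ws.map (pvHit pats)).getD j false = true) := by
    intro j hj
    rw [pvHitP_iff, pv_getD_map_hit ws pats j hj]
  unfold pvTrigP pvTP
  constructor
  · rintro ⟨s, hs, h2, h3, h4⟩
    refine ⟨s, hs, h2, fun j hj hsj => ?_, ?_⟩
    · exact (hAt j (by omega)).mp (h3 j hj hsj)
    · rcases h4 with h | h
      · exact Or.inl h
      · right
        rw [← Bool.not_eq_true]
        exact fun hc => h ((hAt (s-1) (by omega)).mpr hc)
  · rintro ⟨s, hs, h2, h3, h4⟩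
    refine ⟨s, hs, h2, fun j hj hsj => ?_, ?_⟩
    · exact (hAt j (by omega)).mpr (h3 j hj hsj)
    · rcases h4 with h | h
      · exact Or.inl h
      · right
        intro hc
        rw [(hAt (s-1) (by omega)).mp hc] at h
        exact absurd h (by simp)

-- words of a Dom email contain no space and no block character
theorem pv_words_facts (email : String) (hdom : pvDomStr email = true) :
    ∀ w ∈ pvWords email, ' ' ∉ w.toList ∧ '█' ∉ w.toList := by
  intro w hw
  unfold pvWords at hw
  obtain ⟨part, hpart, hw2⟩ := List.mem_flatMap.mp hw
  unfold pvSplitStr at hpart hw2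
  obtain ⟨pc, hpc, rfl⟩ := List.mem_map.mp hpart
  obtain ⟨wc, hwc, rfl⟩ := List.mem_map.mp hw2
  rw [String.toList_ofList] at hwc ⊢
  have hsep1 : (" " : String).toList = [' '] := rfl
  have hsep2 : ("\n" : String).toList = ['\n'] := rfl
  rw [hsep1] at hpc
  rw [hsep2] at hwc
  have h1 := pv_splitOn_mem email.toList ' ' pc hpc
  have h2 := pv_splitOn_mem pc '\n' wc hwc
  constructor
  · intro hsp
    exact ((h1 ' ' ((h2 ' ' hsp).1)).2) rfl
  · intro hbl
    have hmem : '█' ∈ email.toList := (h1 '█' ((h2 '█' hbl).1)).1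
    unfold pvDomStr at hdom
    have := List.all_eq_true.mp hdom _ hmem
    exact absurd this (by decide)

-- A computes the render of the final mask
theorem pv_A_eq (email : String) (censored_list negative_words : List String)
    (Hsf : ∀ w ∈ pvWords email, ' ' ∉ w.toList)
    (Hp : ∀ p ∈ censored_list ++ negative_words, p ≠ "" ∧ '█' ∉ p.toList)
    (HlastG : ((pvWords email).map (pvHit (censored_list ++ negative_words))).getD ((pvWords email).length - 1) false = true →
      pvMaskA (pvTrigs ((pvWords email).map (pvHit (censored_list ++ negative_words))) false)
        (pvWords email).length ((pvWords email).length - 1) ((pvWords email).length - 1) = true) :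
    censor_four email censored_list negative_words
      = PySem.Str.join " " (pvRender (pvWords email)
          (pvMaskA (pvTrigs ((pvWords email).map (pvHit (censored_list ++ negative_words))) false)
            (pvWords email).length (pvWords email).length)) := by
  unfold censor_four
  dsimp only
  rw [pv_ewords email]
  rw [pv_loopA (pvWords email) (censored_list ++ negative_words) Hsf Hp HlastG
    (pvWords email).length (le_refl _)]

-- ===== VERDICT (by name: the statement is the Claim_ definition above) =====
theorem censor_four_spec : Claim_equal_censor_four := by
  unfold Claim_equal_censor_four
  intro email cl neg hdom hpre
  unfold Spec_censor_four
  set pats := cl ++ neg with hpats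
  set ws := pvWords email with hws
  set hs := ws.map (pvHit pats) with hhs
  set t := pvTrigs hs false with htdef
  set n := ws.length with hn
  have hlh : hs.length = n := List.length_map ..
  have hlt : t.length = n := by rw [htdef, pv_length_trigs]; exact hlh
  unfold Dom_censor_four at hdom
  rw [Bool.and_eq_true, Bool.and_eq_true] at hdom
  obtain ⟨⟨hde, hdc⟩, hdn⟩ := hdom
  have hwordf := pv_words_facts email hde
  have Hsf : ∀ w ∈ ws, ' ' ∉ w.toList := fun w hw => (hwordf w hw).1
  unfold Pre_censor_four at hpre
  dsimp only at hpre
  rw [pv_emailWords_eq] at hpre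
  rw [not_or, not_or] at hpre
  obtain ⟨hne, hp1, hp2⟩ := hpre
  have Hp : ∀ p ∈ pats, p ≠ "" ∧ '█' ∉ p.toList := by
    intro p hp
    refine ⟨fun hemp => hne (hemp ▸ hp), fun hb => ?_⟩
    have hdp : pvDomStr p = true := by
      rcases List.mem_append.mp hp with h | h
      · exact List.all_eq_true.mp hdc p h
      · exact List.all_eq_true.mp hdn p h
    have := List.all_eq_true.mp hdp _ hb
    exact absurd this (by decide)
  have hAt : ∀ j, j < n → (pvHitP pats (ws.getD j "") ↔ hs.getD j false = true) := by
    intro j hj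
    rw [pvHitP_iff, hhs, pv_getD_map_hit ws pats j hj]
  have htr : ∀ i, i < n → (pvTrigP pats ws i ↔ t.getD i false = true) :=
    fun i hi => (pv_trigP_iff pats ws i hi).trans (pv_trig_iff_TP hs i (by omega)).symm
  have hT0 : t.getD 0 false = hs.getD 0 false := by
    rw [htdef, pv_trigs_getD_zero]; simp
  have HlastG : hs.getD (n-1) false = true →
      pvMaskA t n (n-1) (n-1) = true := by
    intro hl
    have hn0 : 0 < n := by
      by_contra hcon
      have h0 : n = 0 := by omega
      rw [h0] at hl
      rw [List.getD_eq_default _ _ (by omega)] at hl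
      exact absurd hl (by simp)
    by_cases h1 : n = 1
    · exfalso
      apply hp1
      refine ⟨h1, ?_⟩
      apply (hAt 0 (by omega)).mpr
      rw [h1] at hl
      exact hl
    · have h2 : 2 ≤ n := by omega
      rw [pv_maskA_self t n (n-1) (by omega)]
      by_cases h0 : hs.getD 0 false = true
      · have d1 : decide (0 < n-1) = true := decide_eq_true (by omega)
        have d2 : decide (2 ≤ n) = true := decide_eq_true h2
        have d3 : decide (n-1 = n-1) = true := decide_eq_true rfl
        rw [d1, d2, d3, hT0, h0]
        simp
      · have hT2 : t.getD (n-2) false = true := by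
          by_cases htp : pvTrigP pats ws (n-2)
          · exact (htr (n-2) (by omega)).mp htp
          · exact absurd ⟨h2, (hAt (n-1) (by omega)).mpr hl,
              fun hc => h0 ((hAt 0 (by omega)).mp hc), htp⟩ hp2
        have d0 : decide (1 ≤ n-1) = true := decide_eq_true (by omega)
        rw [d0, show n-1-1 = n-2 from by omega, hT2]
        simp
  rw [pv_A_eq email cl neg Hsf Hp HlastG, pv_B_eq email cl neg HlastG]
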